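-- pv_equiv track=rewrite | github.com/981377660LMT/algorithm-study | 11_动态规划/dp分类/博弈dp/E - Shiritori -bfs博弈dp.py | shiritori
-- ===== SOURCE A (Python) =====
-- from collections import defaultdict, deque
-- from typing import List
--
-- def shiritori(words: List[str]) -> List[int]:
--     """各个单词作为先手开局单词时,先手必胜/必败/平局"""
--     rAdjMap = defaultdict(list)
--     deg = defaultdict(int)
--     allVertex = set()
--     for word in words:
--         u, v = word[:3], word[-3:]
--         rAdjMap[v].append(u)
--         deg[u] += 1
--         allVertex.add(u)
--         allVertex.add(v)
--
--     state = defaultdict(lambda: -1)  # 每个顶点的状态:先手必输:0,先手必胜:1,平局:-1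
--     queue = deque()
--     for v in allVertex:
--         if deg[v] == 0:
--             queue.append(v)
--             state[v] = 0
--
--     while queue:
--         cur = queue.popleft()
--         for next in rAdjMap[cur]:
--             if state[next] != -1:
--                 continue
--             deg[next] -= 1
--             # !1.正图上`可以`一步走到一个先手必输点，则他先手必赢 (对应dfs找到一个对手输的分支)
--             if state[cur] == 0:
--                 state[next] = 1
--                 queue.append(next)
--             # !2.正图上没有边可以走,则为必败态 (对应dfs找到的分支全是对手必胜)
--             elif deg[next] == 0:
--                 state[next] = 0
--                 queue.append(next)
--             # !3.其余情况为平局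
--
--     return [state[w[-3:]] for w in words]
-- ===== SOURCE B (Python) =====
-- def shiritori(words):
--     """各个单词作为先手开局单词时,先手必胜/必败/平局"""
--     # Gauss-Seidel fixpoint iteration on the forward graph instead of reverse BFS:
--     # sweep the vertices up to |V| times; a vertex becomes WIN(1) as soon as it has
--     # a LOSE successor, LOSE(0) once every successor is WIN; stop when a sweep
--     # changes nothing; vertices never resolved are draws (-1).
--     adj = {}
--     state = {}
--     for word in words:
--         u, v = word[:3], word[-3:]
--         adj.setdefault(u, []).append(v)
--         state[u] = -1
--         state[v] = -1
--     for _ in range(len(state)):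
--         changed = False
--         for v in state:
--             if state[v] != -1:
--                 continue
--             succs = adj.get(v, [])
--             if any(state[s] == 0 for s in succs):
--                 state[v] = 1
--                 changed = True
--             elif all(state[s] == 1 for s in succs):
--                 state[v] = 0
--                 changed = True
--         if not changed:
--             break
--     return [state[w[-3:]] for w in words]
-- ===== Notes on version B (the rewrite author's own statement) =====
-- stated objective: alternative
-- what changed: Replaces A's reverse-BFS retrograde analysis (reversed adjacency + indegree counters + deque) by Gauss-Seidel fixpoint sweeps over the forward adjacency: repeatedly re-scan the vertices, marking WIN on a LOSE successor and LOSE when all successors are WIN, until a sweep changes nothing; unresolved vertices are draws.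
import Mathlib
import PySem

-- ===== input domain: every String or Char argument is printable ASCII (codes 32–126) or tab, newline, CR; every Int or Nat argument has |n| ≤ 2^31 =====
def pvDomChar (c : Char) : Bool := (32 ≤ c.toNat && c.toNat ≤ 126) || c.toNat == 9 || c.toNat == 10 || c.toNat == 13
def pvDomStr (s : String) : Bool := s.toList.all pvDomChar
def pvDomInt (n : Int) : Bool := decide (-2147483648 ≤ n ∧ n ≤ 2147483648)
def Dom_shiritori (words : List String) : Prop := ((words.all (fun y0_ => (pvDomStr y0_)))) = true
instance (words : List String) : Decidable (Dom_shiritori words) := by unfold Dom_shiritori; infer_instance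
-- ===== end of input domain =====

-- B replaces A's reverse-BFS (indegree-peeling over the reversed graph) by Gauss-Seidel
-- fixpoint sweeps over the forward adjacency; same exact results, different algorithm.


-- ===== PORT A =====
-- A-side helpers: the build of rAdjMap/deg/allVertex, the initial queue/state, and the
-- BFS while-loop.  Python's `while queue` is ported with fuel `4*len(words)+1`; the proofs
-- below show the queue always empties before the fuel does, so the guard only makes the
-- recursion total.  Python enumerates `for v in allVertex` in hash order; the port uses the
-- set's insertion order (the theorem shows the final answer is the same for any order:
-- it equals shiritori_alt's, which never consumes a set).
def aBuild (words : List String) :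
    PySem.Dict String (List String) × PySem.Dict String Int × PySem.Set String :=
  words.foldl
    (fun acc word =>
      let u := PySem.Str.slice word none (some 3)
      let v := PySem.Str.slice word (some (-3)) none
      (acc.1.insert v (acc.1.getD v [] ++ [u]),
       acc.2.1.insert u (acc.2.1.getD u 0 + 1),
       (acc.2.2.add u).add v))
    (PySem.Dict.empty, PySem.Dict.empty, PySem.Set.empty)

def aInit (allVertex : PySem.Set String) (deg : PySem.Dict String Int) :
    List String × PySem.Dict String Int :=
  allVertex.foldl
    (fun acc v => if deg.getD v 0 == 0 then (acc.1 ++ [v], acc.2.insert v 0) else acc)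
    ([], PySem.Dict.empty)

def aScan (cur : String)
    (acc : PySem.Dict String Int × PySem.Dict String Int × List String) (next : String) :
    PySem.Dict String Int × PySem.Dict String Int × List String :=
  if acc.1.getD next (-1) != -1 then acc
  else
    let deg' := acc.2.1.insert next (acc.2.1.getD next 0 - 1)
    if acc.1.getD cur (-1) == 0 then (acc.1.insert next 1, deg', acc.2.2 ++ [next])
    else if deg'.getD next 0 == 0 then (acc.1.insert next 0, deg', acc.2.2 ++ [next])
    else (acc.1, deg', acc.2.2)

def aLoop (rAdjMap : PySem.Dict String (List String)) :
    Nat → List String → PySem.Dict String Int → PySem.Dict String Int → PySem.Dict String Int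
  | 0, _, state, _ => state
  | _ + 1, [], state, _ => state
  | fuel + 1, cur :: rest, state, deg =>
    let step := (rAdjMap.getD cur []).foldl (aScan cur) (state, deg, [])
    aLoop rAdjMap fuel (rest ++ step.2.2) step.1 step.2.1

def shiritori (words : List String) : List Int :=
  let build := aBuild words
  let init := aInit build.2.2 build.2.1
  let final := aLoop build.1 (4 * words.length + 1) init.1 init.2 build.2.1
  words.map (fun w => final.getD (PySem.Str.slice w (some (-3)) none) (-1))

-- ===== PORT B =====
-- B-side helpers: forward adjacency + state build, and one Gauss-Seidel sweep over the
-- dict's keys.  `state[w[-3:]]` at the end always hits an existing key, so the total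
-- read `getD … (-1)` is exact.
def bBuild (words : List String) :
    PySem.Dict String (List String) × PySem.Dict String Int :=
  words.foldl
    (fun acc word =>
      let u := PySem.Str.slice word none (some 3)
      let v := PySem.Str.slice word (some (-3)) none
      (acc.1.modify u [] (fun l => l ++ [v]),
       (acc.2.insert u (-1)).insert v (-1)))
    (PySem.Dict.empty, PySem.Dict.empty)

def bSweep (adj : PySem.Dict String (List String)) (ks : List String)
    (start : PySem.Dict String Int) : PySem.Dict String Int × Bool :=
  ks.foldl
    (fun acc v =>
      if acc.1.getD v (-1) != -1 then acc
      else
        let succs := adj.getD v []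
        if succs.any (fun s => acc.1.getD s (-1) == 0) then (acc.1.insert v 1, true)
        else if succs.all (fun s => acc.1.getD s (-1) == 1) then (acc.1.insert v 0, true)
        else acc)
    (start, false)

def shiritori_alt (words : List String) : List Int :=
  let build := bBuild words
  let final := (List.range build.2.size).foldl
    (fun acc _ =>
      if acc.2 then acc
      else
        let res := bSweep build.1 acc.1.keys acc.1
        (res.1, !res.2))
    (build.2, false)
  words.map (fun w => (final.1).getD (PySem.Str.slice w (some (-3)) none) (-1))

-- ===== PRECONDITION & SPEC =====
def Spec_shiritori (words : List String) (out : List Int) : Prop := out = shiritori_alt words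
instance (words : List String) (out : List Int) : Decidable (Spec_shiritori words out) := by unfold Spec_shiritori; infer_instance

-- ===== CLAIM (what is proved, stated in full; the proofs are below) =====
def Claim_equal_shiritori : Prop := ∀ (words : List String), Dom_shiritori words → Spec_shiritori words (shiritori words)

-- ===== LEMMAS AND PROOFS =====

-- The edge list of the word graph: word w is an edge w[:3] → w[-3:].
def pvEdges (words : List String) : List (String × String) :=
  words.map (fun w => (PySem.Str.slice w none (some 3), PySem.Str.slice w (some (-3)) none))

-- The canonical game labelling, as a least fixpoint: GS E false v = the first player to
-- move at v loses, GS E true v = the first player wins.  Draws are the vertices with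
-- neither label.
inductive GS (E : List (String × String)) : Bool → String → Prop where
  | lose (v : String) : (∀ w, (v, w) ∈ E → GS E true w) → GS E false v
  | win (v w : String) : (v, w) ∈ E → GS E false w → GS E true v

theorem GS_flip {E : List (String × String)} {b : Bool} {v : String}
    (h : GS E b v) : ¬ GS E (!b) v := by
  induction h with
  | lose v hsucc ih =>
    intro hw
    cases hw with
    | win _ w he hl => exact ih w he hl
  | win v w he hl ih =>
    intro hlose
    cases hlose with
    | lose _ hsucc => exact ih (hsucc w he)


-- A Bool/Prop bookkeeping helper: countP additivity over a case split.
theorem countP_split {α : Type} (l : List α) (p q : α → Bool) :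
    l.countP p = l.countP (fun a => p a && q a) + l.countP (fun a => p a && !q a) := by
  induction l with
  | nil => simp
  | cons x xs ih =>
    simp only [List.countP_cons, ih]
    cases hp : p x <;> cases hq : q x <;> simp <;> omega

-- ===== A-side build characterisation =====
structure ABuildInv (E : List (String × String)) (r : PySem.Dict String (List String))
    (d : PySem.Dict String Int) (s : PySem.Set String) : Prop where
  radj : ∀ v, r.getD v [] = (E.filter (fun e => decide (e.2 = v))).map Prod.fst
  deg : ∀ u, d.getD u 0 = ((E.countP fun e => decide (e.1 = u)) : Int)
  mem : ∀ v, v ∈ s ↔ ∃ e ∈ E, e.1 = v ∨ e.2 = v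
  nodup : List.Nodup s
  card : s.length ≤ 2 * E.length

theorem aBuild_fold (words : List String) :
    ∀ E r d s, ABuildInv E r d s →
      ABuildInv (E ++ pvEdges words)
        (words.foldl
          (fun acc word =>
            let u := PySem.Str.slice word none (some 3)
            let v := PySem.Str.slice word (some (-3)) none
            (acc.1.insert v (acc.1.getD v [] ++ [u]),
             acc.2.1.insert u (acc.2.1.getD u 0 + 1),
             (acc.2.2.add u).add v))
          (r, d, s)).1
        (words.foldl
          (fun acc word =>
            let u := PySem.Str.slice word none (some 3)
            let v := PySem.Str.slice word (some (-3)) none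
            (acc.1.insert v (acc.1.getD v [] ++ [u]),
             acc.2.1.insert u (acc.2.1.getD u 0 + 1),
             (acc.2.2.add u).add v))
          (r, d, s)).2.1
        (words.foldl
          (fun acc word =>
            let u := PySem.Str.slice word none (some 3)
            let v := PySem.Str.slice word (some (-3)) none
            (acc.1.insert v (acc.1.getD v [] ++ [u]),
             acc.2.1.insert u (acc.2.1.getD u 0 + 1),
             (acc.2.2.add u).add v))
          (r, d, s)).2.2 := by
  induction words with
  | nil => intro E r d s h; simpa [pvEdges] using h
  | cons w ws ih =>
    intro E r d s h
    have hstep : ABuildInv (E ++ [(PySem.Str.slice w none (some 3), PySem.Str.slice w (some (-3)) none)])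
        (r.insert (PySem.Str.slice w (some (-3)) none)
          (r.getD (PySem.Str.slice w (some (-3)) none) [] ++ [PySem.Str.slice w none (some 3)]))
        (d.insert (PySem.Str.slice w none (some 3))
          (d.getD (PySem.Str.slice w none (some 3)) 0 + 1))
        ((s.add (PySem.Str.slice w none (some 3))).add (PySem.Str.slice w (some (-3)) none)) := by
      constructor
      · intro v
        rw [PySem.Dict.getD_insert]
        by_cases hv : v = PySem.Str.slice w (some (-3)) none
        · subst hv; simp [h.radj, List.filter_append]
        · simp [hv, h.radj, List.filter_append, Ne.symm hv]
      · intro u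
        rw [PySem.Dict.getD_insert]
        by_cases hu : u = PySem.Str.slice w none (some 3)
        · subst hu; simp [h.deg, List.countP_append]
        · simp [hu, h.deg, List.countP_append, Ne.symm hu]
      · intro v
        simp only [PySem.Set.mem_add, h.mem]
        constructor
        · rintro ((⟨e, he, h1⟩ | h1) | h1)
          · exact ⟨e, by simp [he], h1⟩
          · exact ⟨(PySem.Str.slice w none (some 3), PySem.Str.slice w (some (-3)) none), by simp, Or.inl h1.symm⟩
          · exact ⟨(PySem.Str.slice w none (some 3), PySem.Str.slice w (some (-3)) none), by simp, Or.inr h1.symm⟩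
        · rintro ⟨e, he, h1⟩
          rcases List.mem_append.1 he with he | he
          · exact Or.inl (Or.inl ⟨e, he, h1⟩)
          · simp at he; subst he
            rcases h1 with h1 | h1
            · exact Or.inl (Or.inr h1.symm)
            · exact Or.inr h1.symm
      · exact PySem.Set.nodup_add _ _ (PySem.Set.nodup_add _ _ h.nodup)
      · have h1 : (s.add (PySem.Str.slice w none (some 3))).length ≤ s.length + 1 := by
          by_cases hm : PySem.Str.slice w none (some 3) ∈ s
          · rw [PySem.Set.add_of_mem hm]; omega
          · rw [PySem.Set.add_of_not_mem hm]; simp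
        have h2 : ((s.add (PySem.Str.slice w none (some 3))).add
            (PySem.Str.slice w (some (-3)) none)).length ≤ (s.add (PySem.Str.slice w none (some 3))).length + 1 := by
          by_cases hm : PySem.Str.slice w (some (-3)) none ∈ s.add (PySem.Str.slice w none (some 3))
          · rw [PySem.Set.add_of_mem hm]; omega
          · rw [PySem.Set.add_of_not_mem hm]; simp
        have := h.card
        simp only [List.length_append]
        simp only [List.length_cons]
        omega
    have := ih _ _ _ _ hstep
    simpa [pvEdges, List.append_assoc] using this

theorem aBuild_inv (words : List String) :
    ABuildInv (pvEdges words) (aBuild words).1 (aBuild words).2.1 (aBuild words).2.2 := by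
  have h0 : ABuildInv [] (PySem.Dict.empty) (PySem.Dict.empty) (PySem.Set.empty) := by
    constructor
    · intro v; simp [PySem.Dict.getD_empty]
    · intro u; simp [PySem.Dict.getD_empty]
    · intro v; simp [PySem.Set.empty]
    · simp [PySem.Set.empty]
    · simp [PySem.Set.empty]
  simpa using aBuild_fold words [] _ _ _ h0


-- ===== B-side build characterisation =====
structure BBuildInv (E : List (String × String)) (a : PySem.Dict String (List String))
    (st : PySem.Dict String Int) : Prop where
  adj : ∀ v, a.getD v [] = (E.filter (fun e => decide (e.1 = v))).map Prod.snd
  stval : ∀ v, st.getD v (-1) = -1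
  keymem : ∀ v, v ∈ st.keys ↔ ∃ e ∈ E, e.1 = v ∨ e.2 = v
  keynodup : st.keys.Nodup

theorem bBuild_fold (words : List String) :
    ∀ E a st, BBuildInv E a st →
      BBuildInv (E ++ pvEdges words)
        (words.foldl
          (fun acc word =>
            let u := PySem.Str.slice word none (some 3)
            let v := PySem.Str.slice word (some (-3)) none
            (acc.1.modify u [] (fun l => l ++ [v]),
             (acc.2.insert u (-1)).insert v (-1)))
          (a, st)).1
        (words.foldl
          (fun acc word =>
            let u := PySem.Str.slice word none (some 3)
            let v := PySem.Str.slice word (some (-3)) none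
            (acc.1.modify u [] (fun l => l ++ [v]),
             (acc.2.insert u (-1)).insert v (-1)))
          (a, st)).2 := by
  induction words with
  | nil => intro E a st h; simpa [pvEdges] using h
  | cons w ws ih =>
    intro E a st h
    set u := PySem.Str.slice w none (some 3) with hu
    set v := PySem.Str.slice w (some (-3)) none with hv
    have hstep : BBuildInv (E ++ [(u, v)])
        (a.modify u [] (fun l => l ++ [v])) ((st.insert u (-1)).insert v (-1)) := by
      constructor
      · intro x
        rw [PySem.Dict.getD_modify]
        by_cases hx : x = u
        · subst hx; simp [h.adj, List.filter_append]
        · simp [hx, h.adj, List.filter_append, Ne.symm hx]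
      · intro x
        rw [PySem.Dict.getD_insert, PySem.Dict.getD_insert]
        split_ifs <;> simp [h.stval]
      · intro x
        rw [PySem.Dict.mem_keys_insert, PySem.Dict.mem_keys_insert]
        rw [h.keymem]
        constructor
        · rintro (h1 | h1 | ⟨e, he, h1⟩)
          · exact ⟨(u, v), by simp, Or.inr h1.symm⟩
          · exact ⟨(u, v), by simp, Or.inl h1.symm⟩
          · exact ⟨e, by simp [he], h1⟩
        · rintro ⟨e, he, h1⟩
          rcases List.mem_append.1 he with he | he
          · exact Or.inr (Or.inr ⟨e, he, h1⟩)
          · simp at he; subst he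
            rcases h1 with h1 | h1
            · exact Or.inr (Or.inl h1.symm)
            · exact Or.inl h1.symm
      · -- keys of the two inserts stay nodup
        have h1 : (st.insert u (-1)).keys.Nodup := by
          by_cases hc : st.contains u
          · rw [PySem.Dict.keys_insert_of_contains _ _ hc]; exact h.keynodup
          · have hc' : st.contains u = false := by simpa using hc
            rw [PySem.Dict.keys_insert_of_not_contains _ _ hc']
            simp only [List.nodup_append]
            refine ⟨h.keynodup, by simp, ?_⟩
            intro x hx; simp
            rintro rfl
            have hnk : u ∉ st.keys := by simpa [PySem.Dict.contains_iff_mem_keys] using hc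
            exact hnk hx
        by_cases hc : (st.insert u (-1)).contains v
        · rw [PySem.Dict.keys_insert_of_contains _ _ hc]; exact h1
        · have hc' : (st.insert u (-1)).contains v = false := by simpa using hc
          rw [PySem.Dict.keys_insert_of_not_contains _ _ hc']
          simp only [List.nodup_append]
          refine ⟨h1, by simp, ?_⟩
          intro x hx; simp
          rintro rfl
          have hnk : v ∉ (st.insert u (-1)).keys := by
            simpa [PySem.Dict.contains_iff_mem_keys] using hc
          exact hnk hx
    have := ih _ _ _ hstep
    simpa [pvEdges, List.append_assoc] using this

theorem bBuild_inv (words : List String) :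
    BBuildInv (pvEdges words) (bBuild words).1 (bBuild words).2 := by
  have h0 : BBuildInv [] (PySem.Dict.empty) (PySem.Dict.empty) := by
    constructor
    · intro v; simp [PySem.Dict.getD_empty]
    · intro v; simp [PySem.Dict.getD_empty]
    · intro v; simp [PySem.Dict.keys_empty]
    · simp [PySem.Dict.keys_empty]
  simpa using bBuild_fold words [] _ _ h0

-- ===== A-side initial queue/state =====
theorem aInit_fold (deg : PySem.Dict String Int) (Vl : List String) :
    ∀ (q0 : List String) (st0 : PySem.Dict String Int),
      (Vl.foldl
        (fun acc v => if deg.getD v 0 == 0 then (acc.1 ++ [v], acc.2.insert v 0) else acc)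
        (q0, st0)).1 = q0 ++ Vl.filter (fun v => deg.getD v 0 == 0) ∧
      ∀ v, (Vl.foldl
        (fun acc v => if deg.getD v 0 == 0 then (acc.1 ++ [v], acc.2.insert v 0) else acc)
        (q0, st0)).2.getD v (-1) =
        if v ∈ Vl ∧ deg.getD v 0 = 0 then 0 else st0.getD v (-1) := by
  induction Vl with
  | nil => intro q0 st0; exact ⟨by simp, fun v => by simp⟩
  | cons x xs ih =>
    intro q0 st0
    by_cases hx : deg.getD x 0 = 0
    · have h1 := ih (q0 ++ [x]) (st0.insert x 0)
      constructor
      · rw [List.foldl_cons]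
        simp only [if_pos (by simp [hx] : (deg.getD x 0 == 0) = true)]
        rw [h1.1]
        simp [hx]
      · intro v
        rw [List.foldl_cons]
        simp only [if_pos (by simp [hx] : (deg.getD x 0 == 0) = true)]
        rw [h1.2 v, PySem.Dict.getD_insert]
        by_cases hv : v = x <;> by_cases hm : v ∈ xs ∧ deg.getD v 0 = 0 <;>
          simp [hv, hm, hx]
    · have h1 := ih q0 st0
      constructor
      · rw [List.foldl_cons]
        simp only [if_neg (by simp [hx] : ¬ (deg.getD x 0 == 0) = true)]
        rw [h1.1]
        simp [hx]
      · intro v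
        rw [List.foldl_cons]
        simp only [if_neg (by simp [hx] : ¬ (deg.getD x 0 == 0) = true)]
        rw [h1.2 v]
        by_cases hv : v = x <;> by_cases hm : v ∈ xs ∧ deg.getD v 0 = 0 <;>
          simp [hv, hm, hx]

-- ===== generic completeness (shared by the A- and B-side endgames) =====
theorem GS_complete (E : List (String × String)) (Vs : List String) (s : String → Int)
    (hT : ∀ e ∈ E, e.2 ∈ Vs)
    (h0 : ∀ v, s v = 0 → GS E false v)
    (h1 : ∀ v, s v = 1 → GS E true v)
    (hvals : ∀ v, s v = -1 ∨ s v = 0 ∨ s v = 1)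
    (hpred : ∀ v, s v = 0 → ∀ u ∈ Vs, (u, v) ∈ E → s u ≠ -1)
    (hstab : ∀ v ∈ Vs, s v = -1 → ¬ (∀ w, (v, w) ∈ E → s w = 1)) :
    ∀ (b : Bool) (v : String), GS E b v → v ∈ Vs → s v = if b then 1 else 0 := by
  intro b v h
  induction h with
  | lose v hsucc ih =>
    intro hv
    have hlab : s v ≠ -1 := by
      intro hm
      exact hstab v hv hm (fun w hw => by simpa using ih w hw (hT _ hw))
    rcases hvals v with h' | h' | h'
    · exact absurd h' hlab
    · simpa using h'
    · exact absurd (GS.lose v hsucc) (by simpa using GS_flip (h1 v h'))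
  | win v w he hw ih =>
    intro hv
    have hsw : s w = 0 := by simpa using ih (hT _ he)
    have hlab : s v ≠ -1 := hpred w hsw v hv he
    rcases hvals v with h' | h' | h'
    · exact absurd h' hlab
    · exact absurd (GS.win v w he hw) (by simpa using GS_flip (h0 v h'))
    · simpa using h'

theorem labels_agree (E : List (String × String)) (Vs : List String) (sA sB : String → Int)
    (hA0 : ∀ v, sA v = 0 → GS E false v) (hA1 : ∀ v, sA v = 1 → GS E true v)
    (hAv : ∀ v, sA v = -1 ∨ sA v = 0 ∨ sA v = 1)
    (hB0 : ∀ v, sB v = 0 → GS E false v) (hB1 : ∀ v, sB v = 1 → GS E true v)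
    (hBv : ∀ v, sB v = -1 ∨ sB v = 0 ∨ sB v = 1)
    (hAc : ∀ (b : Bool) (v : String), GS E b v → v ∈ Vs → sA v = if b then 1 else 0)
    (hBc : ∀ (b : Bool) (v : String), GS E b v → v ∈ Vs → sB v = if b then 1 else 0) :
    ∀ v ∈ Vs, sA v = sB v := by
  intro v hv
  rcases hAv v with hA | hA | hA
  · rcases hBv v with hB | hB | hB
    · rw [hA, hB]
    · have h := hAc false v (hB0 v hB) hv
      simp [hA] at h
    · have h := hAc true v (hB1 v hB) hv
      simp [hA] at h
  · have h := hBc false v (hA0 v hA) hv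
    simp at h
    rw [hA, h]
  · have h := hBc true v (hA1 v hA) hv
    simp at h
    rw [hA, h]


-- counting helper: flipping one element of a nodup list from "counted" to "not counted"
theorem countP_update (V : List String) (hnd : V.Nodup) (u : String) (hu : u ∈ V)
    (f g : String → Bool) (hfu : f u = true) (hgu : g u = false)
    (hfg : ∀ v, v ≠ u → g v = f v) :
    V.countP g + 1 = V.countP f := by
  induction V with
  | nil => cases hu
  | cons x xs ih =>
    rcases List.mem_cons.1 hu with hy | hu'
    · subst hy
      have hx : u ∉ xs := (List.nodup_cons.1 hnd).1
      have hc : xs.countP g = xs.countP f :=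
        List.countP_congr (fun v hv => by rw [hfg v (fun h => hx (h ▸ hv))])
      simp [hfu, hgu, hc]
    · have hxu : x ≠ u := fun h => (List.nodup_cons.1 hnd).1 (h ▸ hu')
      have hrec := ih (List.nodup_cons.1 hnd).2 hu'
      simp only [List.countP_cons, hfg x hxu]
      omega

-- multiplicity of u in cur's reverse-adjacency list = multiplicity of the edge (u, cur)
theorem radj_count (E : List (String × String)) (cur u : String) :
    ((E.filter fun e => decide (e.2 = cur)).map Prod.fst).count u
      = E.countP fun e => decide (e.1 = u ∧ e.2 = cur) := by
  rw [List.count_eq_countP, List.countP_map, List.countP_filter]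
  exact List.countP_congr (fun e _ => by by_cases h1 : e.1 = u <;> by_cases h2 : e.2 = cur <;>
    simp [Function.comp, h1, h2])

-- ===== the invariant of A's BFS loop =====
structure AInv (E : List (String × String)) (V P queue : List String)
    (state deg : PySem.Dict String Int) : Prop where
  lbl_iff : ∀ v, state.getD v (-1) ≠ -1 ↔ (v ∈ P ∨ v ∈ queue)
  sound0 : ∀ v, state.getD v (-1) = 0 → GS E false v
  sound1 : ∀ v, state.getD v (-1) = 1 → GS E true v
  vals : ∀ v, state.getD v (-1) = -1 ∨ state.getD v (-1) = 0 ∨ state.getD v (-1) = 1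
  preds : ∀ v ∈ P, state.getD v (-1) = 0 → ∀ u, (u, v) ∈ E → state.getD u (-1) ≠ -1
  degEq : ∀ u, state.getD u (-1) = -1 →
    deg.getD u 0 = ((E.countP fun e => decide (e.1 = u ∧ e.2 ∉ P)) : Int)
  degPos : ∀ u ∈ V, state.getD u (-1) = -1 → deg.getD u 0 ≠ 0
  subV : ∀ v, v ∈ P ∨ v ∈ queue → v ∈ V
  nodupPQ : (P ++ queue).Nodup

-- the invariant while scanning cur's reverse-adjacency list (prefix `pre` processed)
structure AMid (E : List (String × String)) (V : List String) (cur : String)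
    (P rest pre : List String) (st0 state deg : PySem.Dict String Int)
    (pushed : List String) : Prop where
  lbl_iff : ∀ v, state.getD v (-1) ≠ -1 ↔ (v ∈ P ∨ v ∈ (cur :: rest) ∨ v ∈ pushed)
  pers : ∀ v, st0.getD v (-1) ≠ -1 → state.getD v (-1) = st0.getD v (-1)
  sound0 : ∀ v, state.getD v (-1) = 0 → GS E false v
  sound1 : ∀ v, state.getD v (-1) = 1 → GS E true v
  vals : ∀ v, state.getD v (-1) = -1 ∨ state.getD v (-1) = 0 ∨ state.getD v (-1) = 1
  preds : ∀ v ∈ P, state.getD v (-1) = 0 → ∀ u, (u, v) ∈ E → state.getD u (-1) ≠ -1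
  predcur : state.getD cur (-1) = 0 → ∀ u ∈ pre, state.getD u (-1) ≠ -1
  degEq : ∀ u, state.getD u (-1) = -1 →
    deg.getD u 0 = ((E.countP fun e => decide (e.1 = u ∧ e.2 ∉ P)) : Int) - (pre.count u : Int)
  degPos : ∀ u ∈ V, state.getD u (-1) = -1 → deg.getD u 0 ≠ 0
  pushedV : ∀ v ∈ pushed, v ∈ V
  nodup : (P ++ (cur :: rest) ++ pushed).Nodup
  cnt : (V.countP fun v => state.getD v (-1) == -1) + pushed.length
          = (V.countP fun v => st0.getD v (-1) == -1)

theorem aScan_fold (E : List (String × String)) (V : List String) (hVnd : V.Nodup)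
    (hEV : ∀ e ∈ E, e.1 ∈ V ∧ e.2 ∈ V)
    (cur : String) (P rest : List String) (st0 : PySem.Dict String Int)
    (hc0 : st0.getD cur (-1) ≠ -1) :
    ∀ (suf pre : List String) (state deg : PySem.Dict String Int) (pushed : List String),
      pre ++ suf = (E.filter fun e => decide (e.2 = cur)).map Prod.fst →
      AMid E V cur P rest pre st0 state deg pushed →
      AMid E V cur P rest (pre ++ suf) st0
        (suf.foldl (aScan cur) (state, deg, pushed)).1
        (suf.foldl (aScan cur) (state, deg, pushed)).2.1
        (suf.foldl (aScan cur) (state, deg, pushed)).2.2 := by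
  intro suf
  induction suf with
  | nil => intro pre state deg pushed _ h; simpa using h
  | cons u suf' ih =>
    intro pre state deg pushed hsplit h
    have hcurP : cur ∉ P := by
      have h1 : (P ++ cur :: rest).Nodup := (List.nodup_append.1 h.nodup).1
      intro hc
      have hd := (List.nodup_append.1 h1).2.2
      exact hd cur hc cur (List.Mem.head _) rfl
    have hcur_lbl : state.getD cur (-1) ≠ -1 := by
      rw [h.pers cur hc0]; exact hc0
    have hsplit' : (pre ++ [u]) ++ suf' = (E.filter fun e => decide (e.2 = cur)).map Prod.fst := by
      simpa using hsplit
    have huE : (u, cur) ∈ E := by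
      have hu : u ∈ (E.filter fun e => decide (e.2 = cur)).map Prod.fst := by
        rw [← hsplit]; simp
      rcases List.mem_map.1 hu with ⟨e, he, rfl⟩
      rcases List.mem_filter.1 he with ⟨heE, hec⟩
      have : e.2 = cur := by simpa using hec
      exact this ▸ heE
    have huV : u ∈ V := (hEV _ huE).1
    by_cases hl : state.getD u (-1) = -1
    · -- u unlabeled: decrement deg[u], then the three branches
      have hcond : (state.getD u (-1) != -1) = false := by simp [hl]
      have hdec : ∀ w, (deg.insert u (deg.getD u 0 - 1)).getD w 0
          = if w = u then deg.getD u 0 - 1 else deg.getD w 0 := by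
        intro w; rw [PySem.Dict.getD_insert]
      have hfresh : u ∉ P ∧ u ∉ (cur :: rest) ∧ u ∉ pushed := by
        refine ⟨fun hm => ?_, fun hm => ?_, fun hm => ?_⟩
        · exact ((h.lbl_iff u).2 (Or.inl hm)) hl
        · exact ((h.lbl_iff u).2 (Or.inr (Or.inl hm))) hl
        · exact ((h.lbl_iff u).2 (Or.inr (Or.inr hm))) hl
      have hnotall : u ∉ P ++ (cur :: rest) ++ pushed := by
        simp only [List.mem_append]
        rintro ((hm | hm) | hm)
        · exact hfresh.1 hm
        · exact hfresh.2.1 hm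
        · exact hfresh.2.2 hm
      -- the AMid record for labelling u with x (x = 1 or 0), given soundness of the label
      have hmid_label : ∀ (x : Int), x = 0 ∨ x = 1 →
          (x = 0 → GS E false u) → (x = 1 → GS E true u) →
          (x = 0 → state.getD cur (-1) ≠ 0) →
          AMid E V cur P rest (pre ++ [u]) st0 (state.insert u x)
            (deg.insert u (deg.getD u 0 - 1)) (pushed ++ [u]) := by
        intro x hx hs0 hs1 hnc
        have hst' : ∀ v, (state.insert u x).getD v (-1)
            = if v = u then x else state.getD v (-1) := by
          intro v; rw [PySem.Dict.getD_insert]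
        have hxne : x ≠ -1 := by rcases hx with rfl | rfl <;> decide
        refine ⟨?_, ?_, ?_, ?_, ?_, ?_, ?_, ?_, ?_, ?_, ?_, ?_⟩
        · intro v
          rw [hst']
          by_cases hv : v = u
          · subst hv
            rw [if_pos rfl]
            exact iff_of_true hxne (Or.inr (Or.inr (by simp)))
          · rw [if_neg hv]
            rw [h.lbl_iff v]
            simp [List.mem_append, hv]
        · intro v hv0
          have hvu : v ≠ u := by
            intro hEq; subst hEq
            exact hv0 (by rw [← h.pers v hv0]; exact hl)
          rw [hst', if_neg hvu]
          exact h.pers v hv0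
        · intro v hv
          rw [hst'] at hv
          by_cases hvu : v = u
          · subst hvu; rw [if_pos rfl] at hv; exact hs0 hv
          · rw [if_neg hvu] at hv; exact h.sound0 v hv
        · intro v hv
          rw [hst'] at hv
          by_cases hvu : v = u
          · subst hvu; rw [if_pos rfl] at hv; exact hs1 hv
          · rw [if_neg hvu] at hv; exact h.sound1 v hv
        · intro v
          rw [hst']
          by_cases hvu : v = u
          · subst hvu; rw [if_pos rfl]
            rcases hx with rfl | rfl
            · exact Or.inr (Or.inl rfl)
            · exact Or.inr (Or.inr rfl)
          · rw [if_neg hvu]; exact h.vals v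
        · intro v hvP hv0 w hw
          have hvu : v ≠ u := fun hEq => hfresh.1 (hEq ▸ hvP)
          rw [hst', if_neg hvu] at hv0
          rw [hst']
          by_cases hwu : w = u
          · subst hwu; simp [hxne]
          · rw [if_neg hwu]; exact h.preds v hvP hv0 w hw
        · intro hc0 w hw
          have hcu : cur ≠ u := fun hEq => hcur_lbl (hEq ▸ hl)
          rw [hst', if_neg hcu] at hc0
          rw [hst']
          by_cases hwu : w = u
          · subst hwu; simp [hxne]
          · rw [if_neg hwu]
            rcases List.mem_append.1 hw with hw | hw
            · exact h.predcur hc0 w hw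
            · simp [hwu] at hw
        · intro w hw
          rw [hst'] at hw
          by_cases hwu : w = u
          · subst hwu; rw [if_pos rfl] at hw; exact absurd hw hxne
          · rw [if_neg hwu] at hw
            rw [hdec w, if_neg hwu, h.degEq w hw]
            have : (pre ++ [u]).count w = pre.count w := by simp [List.count_append, Ne.symm hwu]
            rw [this]
        · intro w hwV hw
          rw [hst'] at hw
          by_cases hwu : w = u
          · subst hwu; rw [if_pos rfl] at hw; exact absurd hw hxne
          · rw [if_neg hwu] at hw
            rw [hdec w, if_neg hwu]
            exact h.degPos w hwV hw
        · intro v hv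
          rcases List.mem_append.1 hv with hv | hv
          · exact h.pushedV v hv
          · simp at hv; subst hv; exact huV
        · have heq : P ++ (cur :: rest) ++ (pushed ++ [u])
              = (P ++ (cur :: rest) ++ pushed) ++ [u] := by simp
          rw [heq, List.nodup_append]
          refine ⟨h.nodup, List.nodup_singleton u, ?_⟩
          intro a ha b hb
          simp at hb; subst hb
          intro hEq
          exact hnotall (hEq ▸ ha)
        · have hupd := countP_update V hVnd u huV
            (fun v => state.getD v (-1) == -1)
            (fun v => (state.insert u x).getD v (-1) == -1)
            (by simp [hl]) (by simp [hst', hxne])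
            (by intro v hvu; simp [hst', hvu])
          have hold := h.cnt
          simp only [List.length_append, List.length_cons, List.length_nil]
          omega
      rcases h.vals cur with hcv | hcv | hcv
      · exact absurd hcv hcur_lbl
      · -- state[cur] = 0 : u becomes a WIN vertex
        have hstep : aScan cur (state, deg, pushed) u
            = (state.insert u 1, deg.insert u (deg.getD u 0 - 1), pushed ++ [u]) := by
          simp [aScan, hcond, hcv]
        rw [List.foldl_cons, hstep]
        have hmid := hmid_label 1 (Or.inr rfl)
          (by intro hEq; exact absurd hEq one_ne_zero)
          (fun _ => GS.win u cur huE (h.sound0 cur hcv))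
          (by intro hEq; exact absurd hEq one_ne_zero)
        simpa using ih (pre ++ [u]) _ _ _ hsplit' hmid
      · -- state[cur] = 1 : decrement; LOSE if deg hits 0, otherwise no label
        have hc1 : (state.getD cur (-1) == 0) = false := by simp [hcv]
        have hdu : (deg.insert u (deg.getD u 0 - 1)).getD u 0 = deg.getD u 0 - 1 := by
          rw [hdec u, if_pos rfl]
        by_cases hz : deg.getD u 0 - 1 = 0
        · -- deg[u] reached 0: all of u's successors are labelled 1 ⇒ u is LOSE
          have hstep : aScan cur (state, deg, pushed) u
              = (state.insert u 0, deg.insert u (deg.getD u 0 - 1), pushed ++ [u]) := by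
            simp [aScan, hcond, hc1, hz]
          -- every edge out of u goes to P ∪ {cur}
          have hdegu := h.degEq u hl
          have hcnt_eq : (E.countP fun e => decide (e.1 = u ∧ e.2 ∉ P)) = pre.count u + 1 := by
            omega
          have hle : pre.count u + 1 ≤ ((E.filter fun e => decide (e.2 = cur)).map Prod.fst).count u := by
            rw [← hsplit']
            simp [List.count_append]
          have hradj := radj_count E cur u
          have hsplit2 := countP_split E (fun e => decide (e.1 = u ∧ e.2 ∉ P))
            (fun e => decide (e.2 = cur))
          have hAeq : (E.countP fun e => decide (e.1 = u ∧ e.2 ∉ P) && decide (e.2 = cur))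
              = E.countP fun e => decide (e.1 = u ∧ e.2 = cur) := by
            refine List.countP_congr (fun e _ => ?_)
            by_cases h1 : e.1 = u <;> by_cases h2 : e.2 = cur <;>
              simp [h1, h2, hcurP]
          have hB : (E.countP fun e => decide (e.1 = u ∧ e.2 ∉ P) && !decide (e.2 = cur)) = 0 := by
            omega
          have hall : ∀ w, (u, w) ∈ E → w ∈ P ∨ w = cur := by
            intro w hw
            by_contra hcontra
            push Not at hcontra
            have := List.countP_eq_zero.1 hB (u, w) hw
            simp [hcontra.1, hcontra.2] at this
          have hlose : GS E false u := by
            refine GS.lose u (fun w hw => ?_)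
            rcases hall w hw with hwP | rfl
            · have hlbl : state.getD w (-1) ≠ -1 := (h.lbl_iff w).2 (Or.inl hwP)
              rcases h.vals w with hv | hv | hv
              · exact absurd hv hlbl
              · exact absurd hl (h.preds w hwP hv u hw)
              · exact h.sound1 w hv
            · exact h.sound1 w hcv
          rw [List.foldl_cons, hstep]
          have hmid := hmid_label 0 (Or.inl rfl)
            (fun _ => hlose)
            (by intro hEq; exact absurd hEq (by decide))
            (fun _ => by rw [hcv]; decide)
          simpa using ih (pre ++ [u]) _ _ _ hsplit' hmid
        · -- no label: only the decrement happened
          have hstep : aScan cur (state, deg, pushed) u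
              = (state, deg.insert u (deg.getD u 0 - 1), pushed) := by
            simp [aScan, hcond, hc1, hz]
          rw [List.foldl_cons, hstep]
          have hmid : AMid E V cur P rest (pre ++ [u]) st0 state
              (deg.insert u (deg.getD u 0 - 1)) pushed := by
            refine ⟨h.lbl_iff, h.pers, h.sound0, h.sound1, h.vals, h.preds, ?_, ?_, ?_,
              h.pushedV, h.nodup, h.cnt⟩
            · intro hc0
              exact absurd hc0 (by rw [hcv]; decide)
            · intro w hw
              rw [hdec w]
              by_cases hwu : w = u
              · subst hwu
                rw [if_pos rfl, h.degEq w hw]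
                simp [List.count_append]
                omega
              · rw [if_neg hwu, h.degEq w hw]
                simp [List.count_append, Ne.symm hwu]
            · intro w hwV hw
              rw [hdec w]
              by_cases hwu : w = u
              · subst hwu; rw [if_pos rfl]; exact_mod_cast hz
              · rw [if_neg hwu]; exact h.degPos w hwV hw
          simpa using ih (pre ++ [u]) _ _ _ hsplit' hmid
    · -- u already labeled: skip
      have hcond : (state.getD u (-1) != -1) = true := by simpa using hl
      have hstep : aScan cur (state, deg, pushed) u = (state, deg, pushed) := by
        simp [aScan, hcond]
      rw [List.foldl_cons, hstep]
      have hmid : AMid E V cur P rest (pre ++ [u]) st0 state deg pushed := by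
        refine ⟨h.lbl_iff, h.pers, h.sound0, h.sound1, h.vals, h.preds, ?_, ?_, h.degPos,
          h.pushedV, h.nodup, h.cnt⟩
        · intro hcur0 w hw
          rcases List.mem_append.1 hw with hw | hw
          · exact h.predcur hcur0 w hw
          · simp at hw; subst hw; exact hl
        · intro w hw
          have hwu : w ≠ u := fun hEq => hl (hEq ▸ hw)
          rw [h.degEq w hw]
          have hz0 : List.count w [u] = 0 := List.count_eq_zero.2 (by simp [hwu])
          rw [List.count_append, hz0]
          simp
      simpa using ih (pre ++ [u]) state deg pushed hsplit' hmid


theorem aLoop_end (E : List (String × String)) (V : List String) (hVnd : V.Nodup)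
    (hEV : ∀ e ∈ E, e.1 ∈ V ∧ e.2 ∈ V)
    (rAdj : PySem.Dict String (List String))
    (hradj : ∀ v, rAdj.getD v [] = (E.filter fun e => decide (e.2 = v)).map Prod.fst) :
    ∀ (fuel : Nat) (queue P : List String) (state deg : PySem.Dict String Int),
      AInv E V P queue state deg →
      queue.length + (V.countP fun v => state.getD v (-1) == -1) ≤ fuel →
      ∃ P' deg', AInv E V P' [] (aLoop rAdj fuel queue state deg) deg' := by
  intro fuel
  induction fuel with
  | zero =>
    intro queue P state deg hinv hf
    have hq : queue = [] := List.eq_nil_of_length_eq_zero (by omega)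
    subst hq
    exact ⟨P, deg, by simpa [aLoop] using hinv⟩
  | succ fuel ih =>
    intro queue P state deg hinv hf
    cases queue with
    | nil => exact ⟨P, deg, by simpa [aLoop] using hinv⟩
    | cons cur rest =>
      have hc0 : state.getD cur (-1) ≠ -1 := (hinv.lbl_iff cur).2 (Or.inr (List.Mem.head _))
      have hbase : AMid E V cur P rest [] state state deg [] := by
        refine ⟨?_, fun v _ => rfl, hinv.sound0, hinv.sound1, hinv.vals, hinv.preds,
          ?_, ?_, hinv.degPos, by simp, ?_, by simp⟩
        · intro v
          rw [hinv.lbl_iff v]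
          simp
        · intro _ w hw; cases hw
        · intro u hu; rw [hinv.degEq u hu]; simp
        · simpa using hinv.nodupPQ
      have hfold := aScan_fold E V hVnd hEV cur P rest state hc0
        ((E.filter fun e => decide (e.2 = cur)).map Prod.fst) [] state deg []
        (by simp) hbase
      simp only [List.nil_append] at hfold
      -- the port's inner fold, rewritten through hradj
      rw [show aLoop rAdj (fuel + 1) (cur :: rest) state deg
          = aLoop rAdj fuel
              (rest ++ ((rAdj.getD cur []).foldl (aScan cur) (state, deg, [])).2.2)
              ((rAdj.getD cur []).foldl (aScan cur) (state, deg, [])).1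
              ((rAdj.getD cur []).foldl (aScan cur) (state, deg, [])).2.1 from rfl]
      rw [hradj cur]
      set L := (E.filter fun e => decide (e.2 = cur)).map Prod.fst with hL
      set res := L.foldl (aScan cur) (state, deg, []) with hres
      have hcurP : cur ∉ P := by
        have h1 : (P ++ cur :: rest).Nodup := by simpa using hinv.nodupPQ
      -- build AInv for the next iteration
        intro hc
        have hd := (List.nodup_append.1 h1).2.2
        exact hd cur hc cur (List.Mem.head _) rfl
      have hinv' : AInv E V (P ++ [cur]) (rest ++ res.2.2) res.1 res.2.1 := by
        refine ⟨?_, hfold.sound0, hfold.sound1, hfold.vals, ?_, ?_, hfold.degPos, ?_, ?_⟩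
        · intro v
          rw [hfold.lbl_iff v]
          simp [List.mem_append, List.mem_cons]
          tauto
        · intro v hv hv0 u hu
          rcases List.mem_append.1 hv with hvP | hvc
          · exact hfold.preds v hvP hv0 u hu
          · have hvcur : v = cur := by simpa using hvc
            subst hvcur
            have huL : u ∈ L := List.mem_map.2 ⟨(u, v), List.mem_filter.2 ⟨hu, by simp⟩, rfl⟩
            exact hfold.predcur hv0 u huL
        · intro u hu
          rw [hfold.degEq u hu]
          have hradjc : L.count u = E.countP (fun e => decide (e.1 = u ∧ e.2 = cur)) := by
            rw [hL]; exact radj_count E cur u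
          have hsp := countP_split E (fun e => decide (e.1 = u ∧ e.2 ∉ P))
            (fun e => decide (e.2 = cur))
          have hAeq : (E.countP fun e => decide (e.1 = u ∧ e.2 ∉ P) && decide (e.2 = cur))
              = E.countP fun e => decide (e.1 = u ∧ e.2 = cur) := by
            refine List.countP_congr (fun e _ => ?_)
            by_cases h1 : e.1 = u <;> by_cases h2 : e.2 = cur <;> simp [h1, h2, hcurP]
          have hBeq : (E.countP fun e => decide (e.1 = u ∧ e.2 ∉ P) && !decide (e.2 = cur))
              = E.countP fun e => decide (e.1 = u ∧ e.2 ∉ P ++ [cur]) := by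
            refine List.countP_congr (fun e _ => ?_)
            by_cases h1 : e.1 = u <;> by_cases h2 : e.2 = cur <;> by_cases h3 : e.2 ∈ P <;>
              simp [h1, h2, h3]
          omega
        · intro v hv
          rcases hv with hv | hv
          · rcases List.mem_append.1 hv with hv | hv
            · exact hinv.subV v (Or.inl hv)
            · have : v = cur := by simpa using hv
              subst this; exact hinv.subV v (Or.inr (List.Mem.head _))
          · rcases List.mem_append.1 hv with hv | hv
            · exact hinv.subV v (Or.inr (List.mem_cons_of_mem _ hv))
            · exact hfold.pushedV v hv
        · have := hfold.nodup
          have heq : P ++ (cur :: rest) ++ res.2.2 = (P ++ [cur]) ++ (rest ++ res.2.2) := by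
            simp
          rw [heq] at this
          exact this
      have hcnt := hfold.cnt
      refine ih (rest ++ res.2.2) (P ++ [cur]) res.1 res.2.1 hinv' ?_
      have h1 : (rest ++ res.2.2).length = rest.length + res.2.2.length := by
        simp
      simp only [List.length_cons] at hf
      omega

-- the end-state of A's loop satisfies the hypotheses of GS_complete
theorem aEnd_props (E : List (String × String)) (V P : List String)
    (state deg : PySem.Dict String Int) (hinv : AInv E V P [] state deg) :
    (∀ v, state.getD v (-1) = 0 → ∀ u ∈ V, (u, v) ∈ E → state.getD u (-1) ≠ -1) ∧
    (∀ v ∈ V, state.getD v (-1) = -1 → ¬ (∀ w, (v, w) ∈ E → state.getD w (-1) = 1)) := by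
  constructor
  · intro v hv0 u _ hu
    have hvP : v ∈ P := by
      have := (hinv.lbl_iff v).1 (by rw [hv0]; decide)
      simpa using this
    exact hinv.preds v hvP hv0 u hu
  · intro v hvV hv hall
    have hdeg := hinv.degEq v hv
    have hpos := hinv.degPos v hvV hv
    have hcpos : 0 < E.countP fun e => decide (e.1 = v ∧ e.2 ∉ P) := by omega
    rcases List.countP_pos_iff.1 hcpos with ⟨e, heE, hep⟩
    have hep' : e.1 = v ∧ e.2 ∉ P := by simpa using hep
    have hlbl : state.getD e.2 (-1) = -1 := by
      by_contra hne
      have := (hinv.lbl_iff e.2).1 hne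
      simp [hep'.2] at this
    have hedge : (v, e.2) ∈ E := by
      have : e = (v, e.2) := by
        rcases e with ⟨e1, e2⟩; simp at hep' ⊢; exact hep'.1
      exact this ▸ heE
    have := hall e.2 hedge
    rw [hlbl] at this
    exact absurd this (by decide)

-- ===== B-side: the sweep and the outer loop =====
structure BInv (E : List (String × String)) (Vb : List String)
    (st : PySem.Dict String Int) : Prop where
  sound0 : ∀ v, st.getD v (-1) = 0 → GS E false v
  sound1 : ∀ v, st.getD v (-1) = 1 → GS E true v
  vals : ∀ v, st.getD v (-1) = -1 ∨ st.getD v (-1) = 0 ∨ st.getD v (-1) = 1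
  keys : st.keys = Vb

def bStep (adj : PySem.Dict String (List String))
    (acc : PySem.Dict String Int × Bool) (v : String) : PySem.Dict String Int × Bool :=
  if acc.1.getD v (-1) != -1 then acc
  else
    let succs := adj.getD v []
    if succs.any (fun s => acc.1.getD s (-1) == 0) then (acc.1.insert v 1, true)
    else if succs.all (fun s => acc.1.getD s (-1) == 1) then (acc.1.insert v 0, true)
    else acc

theorem bSweep_eq (adj : PySem.Dict String (List String)) (ks : List String)
    (st : PySem.Dict String Int) : bSweep adj ks st = ks.foldl (bStep adj) (st, false) := rfl

theorem mem_adjD (E : List (String × String)) (adj : PySem.Dict String (List String))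
    (hadj : ∀ v, adj.getD v [] = (E.filter fun e => decide (e.1 = v)).map Prod.snd)
    (v w : String) : w ∈ adj.getD v [] ↔ (v, w) ∈ E := by
  rw [hadj v]
  constructor
  · intro hw
    rcases List.mem_map.1 hw with ⟨e, he, rfl⟩
    rcases List.mem_filter.1 he with ⟨heE, hev⟩
    have h1 : e.1 = v := by simpa using hev
    have : e = (v, e.2) := by rcases e with ⟨e1, e2⟩; simp at h1 ⊢; exact h1
    exact this ▸ heE
  · intro hw
    exact List.mem_map.2 ⟨(v, w), List.mem_filter.2 ⟨hw, by simp⟩, rfl⟩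

theorem bFold (E : List (String × String)) (Vb : List String) (hVbnd : Vb.Nodup)
    (adj : PySem.Dict String (List String))
    (hadj : ∀ v, adj.getD v [] = (E.filter fun e => decide (e.1 = v)).map Prod.snd) :
    ∀ (ks : List String), (∀ v ∈ ks, v ∈ Vb) →
    ∀ (st : PySem.Dict String Int) (flag : Bool), BInv E Vb st →
      BInv E Vb (ks.foldl (bStep adj) (st, flag)).1 ∧
      ((ks.foldl (bStep adj) (st, flag)).2 = false → flag = false ∧
        (ks.foldl (bStep adj) (st, flag)).1 = st ∧
        (∀ v ∈ ks, st.getD v (-1) = -1 →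
          (adj.getD v []).any (fun s => st.getD s (-1) == 0) = false ∧
          (adj.getD v []).all (fun s => st.getD s (-1) == 1) = false)) ∧
      (Vb.countP fun v => (ks.foldl (bStep adj) (st, flag)).1.getD v (-1) == -1)
          + (if (ks.foldl (bStep adj) (st, flag)).2 then 1 else 0)
        ≤ (Vb.countP fun v => st.getD v (-1) == -1) + (if flag then 1 else 0) := by
  intro ks
  induction ks with
  | nil =>
    intro _ st flag hb
    refine ⟨hb, fun _ => ⟨by simpa, rfl, by simp⟩, ?_⟩
    exact le_rfl
  | cons v ks' ih =>
    intro hks st flag hb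
    have hvVb : v ∈ Vb := hks v (List.Mem.head _)
    have hks' : ∀ x ∈ ks', x ∈ Vb := fun x hx => hks x (List.mem_cons_of_mem _ hx)
    by_cases hv : st.getD v (-1) = -1
    · have hcond : (st.getD v (-1) != -1) = false := by simp [hv]
      by_cases hany : (adj.getD v []).any (fun s => st.getD s (-1) == 0) = true
      · -- v becomes WIN
        have hstep : bStep adj (st, flag) v = (st.insert v 1, true) := by
          simp [bStep, hcond, hany]
        have hwin : GS E true v := by
          rcases List.any_eq_true.1 hany with ⟨w, hwmem, hw0⟩
          have hw0' : st.getD w (-1) = 0 := by simpa using hw0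
          exact GS.win v w ((mem_adjD E adj hadj v w).1 hwmem) (hb.sound0 w hw0')
        have hins : ∀ x, (st.insert v 1).getD x (-1)
            = if x = v then 1 else st.getD x (-1) := fun x => by
          rw [PySem.Dict.getD_insert]
        have hb' : BInv E Vb (st.insert v 1) := by
          refine ⟨?_, ?_, ?_, ?_⟩
          · intro x hx; rw [hins x] at hx
            by_cases hxv : x = v
            · rw [if_pos hxv] at hx; exact absurd hx (by decide)
            · rw [if_neg hxv] at hx; exact hb.sound0 x hx
          · intro x hx; rw [hins x] at hx
            by_cases hxv : x = v
            · subst hxv; exact hwin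
            · rw [if_neg hxv] at hx; exact hb.sound1 x hx
          · intro x; rw [hins x]
            by_cases hxv : x = v
            · rw [if_pos hxv]; exact Or.inr (Or.inr rfl)
            · rw [if_neg hxv]; exact hb.vals x
          · rw [PySem.Dict.keys_insert_of_contains _ _ ?_]
            · exact hb.keys
            · rw [PySem.Dict.contains_iff_mem_keys, hb.keys]; exact hvVb
        have hrec := ih hks' (st.insert v 1) true hb'
        have hupd := countP_update Vb hVbnd v hvVb
          (fun x => st.getD x (-1) == -1)
          (fun x => (st.insert v 1).getD x (-1) == -1)
          (by simp [hv]) (by simp [hins]) (by intro x hx; simp [hins, hx])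
        rw [List.foldl_cons, hstep]
        refine ⟨hrec.1, ?_, ?_⟩
        · intro hfalse
          exact absurd (hrec.2.1 hfalse).1 (by simp)
        · have := hrec.2.2
          split_ifs at this ⊢ <;> omega
      · by_cases hall : (adj.getD v []).all (fun s => st.getD s (-1) == 1) = true
        · -- v becomes LOSE
          have hstep : bStep adj (st, flag) v = (st.insert v 0, true) := by
            simp [bStep, hcond, hany, hall]
          have hlose : GS E false v := by
            refine GS.lose v (fun w hw => ?_)
            have hwmem : w ∈ adj.getD v [] := (mem_adjD E adj hadj v w).2 hw
            have := List.all_eq_true.1 hall w hwmem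
            exact hb.sound1 w (by simpa using this)
          have hins : ∀ x, (st.insert v 0).getD x (-1)
              = if x = v then 0 else st.getD x (-1) := fun x => by
            rw [PySem.Dict.getD_insert]
          have hb' : BInv E Vb (st.insert v 0) := by
            refine ⟨?_, ?_, ?_, ?_⟩
            · intro x hx; rw [hins x] at hx
              by_cases hxv : x = v
              · subst hxv; exact hlose
              · rw [if_neg hxv] at hx; exact hb.sound0 x hx
            · intro x hx; rw [hins x] at hx
              by_cases hxv : x = v
              · rw [if_pos hxv] at hx; exact absurd hx (by decide)
              · rw [if_neg hxv] at hx; exact hb.sound1 x hx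
            · intro x; rw [hins x]
              by_cases hxv : x = v
              · rw [if_pos hxv]; exact Or.inr (Or.inl rfl)
              · rw [if_neg hxv]; exact hb.vals x
            · rw [PySem.Dict.keys_insert_of_contains _ _ ?_]
              · exact hb.keys
              · rw [PySem.Dict.contains_iff_mem_keys, hb.keys]; exact hvVb
          have hrec := ih hks' (st.insert v 0) true hb'
          have hupd := countP_update Vb hVbnd v hvVb
            (fun x => st.getD x (-1) == -1)
            (fun x => (st.insert v 0).getD x (-1) == -1)
            (by simp [hv]) (by simp [hins]) (by intro x hx; simp [hins, hx])
          rw [List.foldl_cons, hstep]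
          refine ⟨hrec.1, ?_, ?_⟩
          · intro hfalse
            exact absurd (hrec.2.1 hfalse).1 (by simp)
          · have := hrec.2.2
            split_ifs at this ⊢ <;> omega
        · -- v stays a draw for now
          have hstep : bStep adj (st, flag) v = (st, flag) := by
            simp [bStep, hcond, hany, hall]
          have hrec := ih hks' st flag hb
          rw [List.foldl_cons, hstep]
          refine ⟨hrec.1, ?_, hrec.2.2⟩
          intro hfalse
          refine ⟨(hrec.2.1 hfalse).1, (hrec.2.1 hfalse).2.1, ?_⟩
          intro x hx hx1
          rcases List.mem_cons.1 hx with hxe | hx'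
          · subst hxe
            exact ⟨by simpa using hany, by simpa using hall⟩
          · exact (hrec.2.1 hfalse).2.2 x hx' hx1
    · -- v already labelled: skip
      have hcond : (st.getD v (-1) != -1) = true := by simpa using hv
      have hstep : bStep adj (st, flag) v = (st, flag) := by simp [bStep, hcond]
      have hrec := ih hks' st flag hb
      rw [List.foldl_cons, hstep]
      refine ⟨hrec.1, ?_, hrec.2.2⟩
      intro hfalse
      refine ⟨(hrec.2.1 hfalse).1, (hrec.2.1 hfalse).2.1, ?_⟩
      intro x hx hx1
      rcases List.mem_cons.1 hx with hxe | hx'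
      · subst hxe; exact absurd hx1 hv
      · exact (hrec.2.1 hfalse).2.2 x hx' hx1

-- one iteration of B's outer loop (the body of the `for _ in range(...)` with early stop)
def bRound (adj : PySem.Dict String (List String))
    (acc : PySem.Dict String Int × Bool) : PySem.Dict String Int × Bool :=
  if acc.2 then acc
  else
    let res := bSweep adj acc.1.keys acc.1
    (res.1, !res.2)

theorem foldl_const {α β : Type} (g : α → α) :
    ∀ (l : List β) (a : α), l.foldl (fun acc _ => g acc) a = g^[l.length] a := by
  intro l
  induction l with
  | nil => intro a; simp
  | cons x xs ih =>
    intro a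
    rw [List.foldl_cons, ih (g a), List.length_cons, Function.iterate_succ_apply]

theorem bOuter (E : List (String × String)) (Vb : List String) (hVbnd : Vb.Nodup)
    (adj : PySem.Dict String (List String))
    (hadj : ∀ v, adj.getD v [] = (E.filter fun e => decide (e.1 = v)).map Prod.snd) :
    ∀ (n : Nat) (st : PySem.Dict String Int), BInv E Vb st →
      (Vb.countP fun v => st.getD v (-1) == -1) ≤ n →
      BInv E Vb ((bRound adj)^[n] (st, false)).1 ∧
      (∀ v ∈ Vb, ((bRound adj)^[n] (st, false)).1.getD v (-1) = -1 →
        (adj.getD v []).any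
          (fun s => ((bRound adj)^[n] (st, false)).1.getD s (-1) == 0) = false ∧
        (adj.getD v []).all
          (fun s => ((bRound adj)^[n] (st, false)).1.getD s (-1) == 1) = false) := by
  intro n
  induction n with
  | zero =>
    intro st hb hc
    simp only [Function.iterate_zero, id]
    refine ⟨hb, ?_⟩
    intro v hv hvm
    have hz : (Vb.countP fun v => st.getD v (-1) == -1) = 0 := by omega
    have := List.countP_eq_zero.1 hz v hv
    simp [hvm] at this
  | succ n ih =>
    intro st hb hc
    rw [Function.iterate_succ_apply]
    have hsw := bFold E Vb hVbnd adj hadj Vb (fun _ hv => hv) st false hb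
    have hkeys : st.keys = Vb := hb.keys
    have hg : bRound adj (st, false)
        = ((Vb.foldl (bStep adj) (st, false)).1, !(Vb.foldl (bStep adj) (st, false)).2) := by
      simp only [bRound, Bool.false_eq_true, if_false, bSweep_eq, hkeys]
    cases hres : (Vb.foldl (bStep adj) (st, false)).2
    · -- the sweep changed nothing: done flag set, state frozen
      have hstable := hsw.2.1 hres
      rw [hg, hres, hstable.2.1]
      simp only [Bool.not_false]
      have hfix : bRound adj (st, true) = (st, true) := by simp [bRound]
      rw [Function.iterate_fixed hfix]
      exact ⟨hb, fun v hv hvm => hstable.2.2 v hv hvm⟩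
    · -- progress was made: recurse with a smaller unresolved count
      have hcnt := hsw.2.2
      simp only [hres, if_true, if_false, Bool.false_eq_true] at hcnt
      have hle : (Vb.countP fun v => (Vb.foldl (bStep adj) (st, false)).1.getD v (-1) == -1) ≤ n := by
        omega
      have hrec := ih (Vb.foldl (bStep adj) (st, false)).1 hsw.1 hle
      rw [hg, hres]
      simpa using hrec

theorem bEnd_props (E : List (String × String)) (Vb : List String)
    (adj : PySem.Dict String (List String))
    (hadj : ∀ v, adj.getD v [] = (E.filter fun e => decide (e.1 = v)).map Prod.snd)
    (st : PySem.Dict String Int)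
    (hst : ∀ v ∈ Vb, st.getD v (-1) = -1 →
      (adj.getD v []).any (fun s => st.getD s (-1) == 0) = false ∧
      (adj.getD v []).all (fun s => st.getD s (-1) == 1) = false) :
    (∀ v, st.getD v (-1) = 0 → ∀ u ∈ Vb, (u, v) ∈ E → st.getD u (-1) ≠ -1) ∧
    (∀ v ∈ Vb, st.getD v (-1) = -1 → ¬ (∀ w, (v, w) ∈ E → st.getD w (-1) = 1)) := by
  constructor
  · intro v hv0 u huVb hu hum
    have hvadj : v ∈ adj.getD u [] := (mem_adjD E adj hadj u v).2 hu
    have := List.any_eq_false.1 (hst u huVb hum).1 v hvadj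
    simp [hv0] at this
  · intro v hvVb hvm hall
    rcases List.all_eq_false.1 (hst v hvVb hvm).2 with ⟨w, hwmem, hw1⟩
    have hedge : (v, w) ∈ E := (mem_adjD E adj hadj v w).1 hwmem
    have := hall w hedge
    simp [this] at hw1

theorem shiritori_spec : Claim_equal_shiritori := by
  unfold Claim_equal_shiritori
  intro words _
  unfold Spec_shiritori
  -- shared edge list
  set E := pvEdges words with hE
  -- ===== A side =====
  have hA := aBuild_inv words
  set V : List String := (aBuild words).2.2 with hV
  have hEV : ∀ e ∈ E, e.1 ∈ V ∧ e.2 ∈ V := fun e he =>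
    ⟨(hA.mem e.1).2 ⟨e, he, Or.inl rfl⟩, (hA.mem e.2).2 ⟨e, he, Or.inr rfl⟩⟩
  have hVnd : V.Nodup := hA.nodup
  have hIa := aInit_fold (aBuild words).2.1 V [] PySem.Dict.empty
  have hq0 : (aInit V (aBuild words).2.1).1
      = V.filter (fun v => (aBuild words).2.1.getD v 0 == 0) := by
    have := hIa.1
    simpa [aInit] using this
  have hs0 : ∀ v, (aInit V (aBuild words).2.1).2.getD v (-1)
      = if v ∈ V ∧ (aBuild words).2.1.getD v 0 = 0 then 0 else -1 := by
    intro v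
    have := hIa.2 v
    simpa [aInit, PySem.Dict.getD_empty] using this
  have hinv0 : AInv E V []
      (V.filter (fun v => (aBuild words).2.1.getD v 0 == 0))
      (aInit V (aBuild words).2.1).2 (aBuild words).2.1 := by
    refine ⟨?_, ?_, ?_, ?_, ?_, ?_, ?_, ?_, ?_⟩
    · intro v
      rw [hs0 v]
      by_cases h : v ∈ V ∧ (aBuild words).2.1.getD v 0 = 0
      · simp only [if_pos h]
        constructor
        · intro _; exact Or.inr (List.mem_filter.2 ⟨h.1, by simp [h.2]⟩)
        · intro _; decide
      · simp only [if_neg h]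
        constructor
        · intro hc; exact absurd rfl hc
        · rintro (hc | hc)
          · cases hc
          · rcases List.mem_filter.1 hc with ⟨h1, h2⟩
            exact absurd ⟨h1, by simpa using h2⟩ h
    · intro v hv
      rw [hs0 v] at hv
      split_ifs at hv with h
      · have hdeg : ((E.countP fun e => decide (e.1 = v) : Nat) : Int) = 0 := by
          rw [← hA.deg v, h.2]
        have hz : (E.countP fun e => decide (e.1 = v)) = 0 := by exact_mod_cast hdeg
        refine GS.lose v (fun w hw => ?_)
        have hfalse := List.countP_eq_zero.1 hz (v, w) hw
        simp at hfalse
    · intro v hv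
      rw [hs0 v] at hv
      split_ifs at hv
      omega
    · intro v
      rw [hs0 v]
      split_ifs
      · exact Or.inr (Or.inl rfl)
      · exact Or.inl rfl
    · intro v hv; cases hv
    · intro u hu
      rw [hA.deg u]
      have : (E.countP fun e => decide (e.1 = u ∧ e.2 ∉ ([] : List String)))
          = E.countP fun e => decide (e.1 = u) :=
        List.countP_congr (fun e _ => by simp)
      rw [this]
    · intro u huV hu
      rw [hs0 u] at hu
      split_ifs at hu with h
      intro hz
      exact h ⟨huV, hz⟩
    · intro v hv
      rcases hv with hv | hv
      · cases hv
      · exact (List.mem_filter.1 hv).1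
    · simpa using hVnd.filter _
  have hfuel : (V.filter (fun v => (aBuild words).2.1.getD v 0 == 0)).length
      + (V.countP fun v => (aInit V (aBuild words).2.1).2.getD v (-1) == -1)
      ≤ 4 * words.length + 1 := by
    have h1 := List.length_filter_le (fun v => (aBuild words).2.1.getD v 0 == 0) V
    have h2 := List.countP_le_length
      (p := fun v => (aInit V (aBuild words).2.1).2.getD v (-1) == -1) (l := V)
    have h3 := hA.card
    have h4 : (pvEdges words).length = words.length := by simp [pvEdges]
    have h5 : E.length = (pvEdges words).length := by rw [hE]
    omega
  obtain ⟨PA, degA, hendA⟩ := aLoop_end E V hVnd hEV (aBuild words).1 hA.radj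
    (4 * words.length + 1)
    (V.filter (fun v => (aBuild words).2.1.getD v 0 == 0))
    [] (aInit V (aBuild words).2.1).2 (aBuild words).2.1 hinv0 hfuel
  set stF := aLoop (aBuild words).1 (4 * words.length + 1)
    (V.filter (fun v => (aBuild words).2.1.getD v 0 == 0))
    (aInit V (aBuild words).2.1).2 (aBuild words).2.1 with hstF
  have hpropsA := aEnd_props E V PA stF degA hendA
  have hAc := GS_complete E V (fun v => stF.getD v (-1))
    (fun e he => (hEV e he).2) hendA.sound0 hendA.sound1 hendA.vals
    hpropsA.1 hpropsA.2
  -- ===== B side =====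
  have hB := bBuild_inv words
  set Vb : List String := (bBuild words).2.keys with hVb
  have hVbnd : Vb.Nodup := hB.keynodup
  have hbinv0 : BInv E Vb (bBuild words).2 := by
    refine ⟨?_, ?_, ?_, rfl⟩
    · intro v hv; rw [hB.stval v] at hv; exact absurd hv (by decide)
    · intro v hv; rw [hB.stval v] at hv; exact absurd hv (by decide)
    · intro v; exact Or.inl (hB.stval v)
  have hcnt0 : (Vb.countP fun v => (bBuild words).2.getD v (-1) == -1)
      ≤ (bBuild words).2.size := by
    have h1 := List.countP_le_length
      (p := fun v => (bBuild words).2.getD v (-1) == -1) (l := Vb)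
    have h2 : Vb.length = (bBuild words).2.size := by
      simp [hVb, PySem.Dict.keys, PySem.Dict.size]
    omega
  have hout := bOuter E Vb hVbnd (bBuild words).1 hB.adj (bBuild words).2.size
    (bBuild words).2 hbinv0 hcnt0
  set stB := ((bRound (bBuild words).1)^[(bBuild words).2.size] ((bBuild words).2, false)).1
    with hstB
  have hpropsB := bEnd_props E Vb (bBuild words).1 hB.adj stB hout.2
  have hBc := GS_complete E Vb (fun v => stB.getD v (-1))
    (fun e he => (hB.keymem e.2).2 ⟨e, he, Or.inr rfl⟩)
    hout.1.sound0 hout.1.sound1 hout.1.vals hpropsB.1 hpropsB.2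
  -- ===== membership transfer and agreement =====
  have hVVb : ∀ v, v ∈ V ↔ v ∈ Vb := fun v => (hA.mem v).trans (hB.keymem v).symm
  have hagree := labels_agree E V (fun v => stF.getD v (-1)) (fun v => stB.getD v (-1))
    hendA.sound0 hendA.sound1 hendA.vals hout.1.sound0 hout.1.sound1 hout.1.vals
    hAc (fun b v hg hv => hBc b v hg ((hVVb v).1 hv))
  -- ===== both ports compute these labellings =====
  have e1 : shiritori words
      = words.map (fun w => (aLoop (aBuild words).1 (4 * words.length + 1)
          (aInit (aBuild words).2.2 (aBuild words).2.1).1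
          (aInit (aBuild words).2.2 (aBuild words).2.1).2 (aBuild words).2.1).getD
          (PySem.Str.slice w (some (-3)) none) (-1)) := rfl
  rw [← hV] at e1
  rw [hq0] at e1
  rw [← hstF] at e1
  have e2 : shiritori_alt words
      = words.map (fun w => stB.getD (PySem.Str.slice w (some (-3)) none) (-1)) := by
    have halt : shiritori_alt words = words.map (fun w =>
        ((List.range (bBuild words).2.size).foldl
          (fun acc _ =>
            if acc.2 then acc
            else
              let res := bSweep (bBuild words).1 acc.1.keys acc.1
              (res.1, !res.2))
          ((bBuild words).2, false)).1.getD (PySem.Str.slice w (some (-3)) none) (-1)) := rfl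
    rw [halt]
    have hconst := foldl_const (bRound (bBuild words).1)
      (List.range (bBuild words).2.size) ((bBuild words).2, false)
    have hlam : (List.range (bBuild words).2.size).foldl
        (fun acc _ =>
          if acc.2 then acc
          else
            let res := bSweep (bBuild words).1 acc.1.keys acc.1
            (res.1, !res.2))
        ((bBuild words).2, false)
        = (bRound (bBuild words).1)^[(List.range (bBuild words).2.size).length]
            ((bBuild words).2, false) := hconst
    rw [hlam, List.length_range, ← hstB]
  rw [e1, e2]
  refine List.map_congr_left (fun w hw => ?_)
  have hkey : PySem.Str.slice w (some (-3)) none ∈ V := by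
    refine (hA.mem _).2 ⟨(PySem.Str.slice w none (some 3), PySem.Str.slice w (some (-3)) none),
      ?_, Or.inr rfl⟩
    exact List.mem_map.2 ⟨w, hw, rfl⟩
  exact hagree _ hkey
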